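-- pv_equiv track=rewrite | github.com/nfahmad/EECS210 | Assignment5/EECS210_Assignment5.py | determineFunction
-- ===== SOURCE A (Python) =====
-- def determineFunction(f):
--     domain = set()
--     #Iterate through every pair in the relation
--     for pair in f:
--         value1, value2 = pair
--         #Check if the first element is already in the domain
--         if value1 in domain:
--             return False
--         #Add that first element to the domain set
--         domain.add(value1)
--     #If every first element is unique, it is a function
--     return True
-- ===== SOURCE B (Python) =====
-- def determineFunction(f):
--     firsts = sorted(a for a, b in f)
--     return all(x != y for x, y in zip(firsts, firsts[1:]))
-- ===== Notes on version B (the rewrite author's own statement) =====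
-- stated objective: alternative
-- what changed: Replaces A's hash-set scan with early return by sort-then-adjacent-scan: sort the first elements and check that no two neighbours are equal.
import Mathlib
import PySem

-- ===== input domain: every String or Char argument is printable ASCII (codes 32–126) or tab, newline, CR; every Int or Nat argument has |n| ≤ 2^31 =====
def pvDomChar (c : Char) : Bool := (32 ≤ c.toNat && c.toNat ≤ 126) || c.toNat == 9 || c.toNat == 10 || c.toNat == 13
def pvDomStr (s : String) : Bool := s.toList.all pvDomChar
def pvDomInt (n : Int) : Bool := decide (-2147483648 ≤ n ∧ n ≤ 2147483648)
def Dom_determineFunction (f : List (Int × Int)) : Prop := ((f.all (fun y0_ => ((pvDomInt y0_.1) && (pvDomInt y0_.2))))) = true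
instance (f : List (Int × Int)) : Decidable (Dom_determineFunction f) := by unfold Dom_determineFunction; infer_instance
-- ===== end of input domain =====

-- B sorts the first elements and checks that no two adjacent entries are equal,
-- instead of A's hash-set scan with early return; a different algorithm, not faster.

-- ===== PORT A =====
-- the 'for pair in f' loop with early 'return False', carrying the 'domain' set
def dfLoop : List (Int × Int) → PySem.Set Int → Bool
  | [], _ => true
  | (value1, _) :: rest, domain =>
    if PySem.Set.contains domain value1 then false
    else dfLoop rest (PySem.Set.add domain value1)

def determineFunction (f : List (Int × Int)) : Bool :=
  dfLoop f PySem.Set.empty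

-- ===== PORT B =====
def determineFunction_alt (f : List (Int × Int)) : Bool :=
  let firsts := PySem.List.sorted (f.map (fun p => p.1)) (fun x => x) false
  (firsts.zip (firsts.drop 1)).all (fun p => p.1 != p.2)

-- ===== PRECONDITION & SPEC =====
def Spec_determineFunction (f : List (Int × Int)) (out : Bool) : Prop := out = determineFunction_alt f
instance (f : List (Int × Int)) (out : Bool) : Decidable (Spec_determineFunction f out) := by unfold Spec_determineFunction; infer_instance

-- ===== CLAIM =====
def Claim_equal_determineFunction : Prop := ∀ (f : List (Int × Int)), Dom_determineFunction f → Spec_determineFunction f (determineFunction f)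

-- ===== LEMMAS AND PROOFS =====

-- A's loop succeeds iff the remaining first elements are distinct and disjoint from the set so far
lemma dfLoop_eq_nodup (f : List (Int × Int)) (s : PySem.Set Int) :
    dfLoop f s =
      decide ((f.map (fun p => p.1)).Nodup ∧ ∀ x ∈ f.map (fun p => p.1), x ∉ s) := by
  induction f generalizing s with
  | nil => simp [dfLoop]
  | cons p rest ih =>
    obtain ⟨a, b⟩ := p
    simp only [dfLoop, List.map_cons]
    by_cases h : a ∈ s
    · rw [if_pos (by simpa [PySem.Set.contains] using h)]
      simp [h]
    · rw [if_neg (by simpa [PySem.Set.contains] using h), ih]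
      simp only [decide_eq_decide, List.nodup_cons, List.mem_cons]
      constructor
      · rintro ⟨hn, hdisj⟩
        refine ⟨⟨fun hmem => ?_, hn⟩, ?_⟩
        · exact absurd (by simp [PySem.Set.mem_add]) (hdisj _ hmem)
        · rintro x (rfl | hx)
          · exact h
          · intro hxs
            exact hdisj x hx (by simp [PySem.Set.mem_add, hxs])
      · rintro ⟨⟨hna, hn⟩, hdisj⟩
        refine ⟨hn, fun x hx hxadd => ?_⟩
        rcases (by simpa [PySem.Set.mem_add] using hxadd) with h1 | rfl
        · exact hdisj x (Or.inr hx) h1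
        · exact hna hx

-- on a ≤-sorted list, "no two adjacent entries equal" is exactly Nodup
lemma adj_all_of_sorted (ys : List Int) (hs : ys.Pairwise (· ≤ ·)) :
    ((ys.zip (ys.drop 1)).all (fun p => p.1 != p.2)) = decide ys.Nodup := by
  induction ys with
  | nil => simp
  | cons x t ih =>
    cases t with
    | nil => simp
    | cons y t' =>
      rcases hs with _ | ⟨hle, hs'⟩
      have ih' := ih hs'
      simp only [List.drop_succ_cons, List.drop_zero] at ih'
      simp only [List.drop_succ_cons, List.drop_zero, List.zip_cons_cons, List.all_cons, ih']
      have hxy : x ≤ y := hle y (by simp)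
      by_cases hxyne : x = y
      · subst hxyne
        simp
      · have hnot : x ∉ y :: t' := by
          intro hmem
          rcases List.mem_cons.mp hmem with rfl | hmem'
          · exact hxyne rfl
          · have h1 : x ≤ y := hxy
            have h2 : y ≤ x := by
              rcases hs' with _ | ⟨hle', _⟩
              exact hle' x hmem'
            exact hxyne (le_antisymm h1 h2)
        simp [hxyne, List.nodup_cons, hnot]

-- ===== VERDICT =====
theorem determineFunction_spec : Claim_equal_determineFunction := by
  intro f _
  unfold Spec_determineFunction determineFunction determineFunction_alt
  rw [dfLoop_eq_nodup]
  have hpw : (PySem.List.sorted (f.map (fun p => p.1)) (fun x => x) false).Pairwise (· ≤ ·) :=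
    PySem.List.sorted_pairwise _ _
  rw [adj_all_of_sorted _ hpw]
  have hperm := PySem.List.sorted_perm (f.map (fun p => p.1)) (fun x => x) (rev := false)
  simp only [decide_eq_decide, hperm.nodup_iff]
  simp [PySem.Set.empty]
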